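-- pv_equiv track=rewrite | github.com/Jehuty1989/tests | just_for_fun/test_2.py | numDuplicates
-- ===== SOURCE A (Python) =====
-- def numDuplicates(name, price, weight):
--
--     num_dupes = 0
--     dupes_which = []
--
--     for x in range(len(name)):
--
--         for y in range(x + 1, len(name)):
--
--             if (name[x] == name[y] and price[x] == price[y]) and weight[x] == weight[y]:
--                 dupes_which.append(y)
--
--                 for z in range(len(dupes_which)):
--                     if dupes_which[z] == x:
--                         break
--
--                     elif z == (len(dupes_which) - 1):
--                         num_dupes += 1
--
--     return num_dupes
-- ===== SOURCE B (Python) =====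
-- def numDuplicates(name, price, weight):
--     seen = set()
--     num_dupes = 0
--     for t in zip(name, price, weight):
--         if t in seen:
--             num_dupes += 1
--         else:
--             seen.add(t)
--     return num_dupes
-- ===== Notes on version B (the rewrite author's own statement) =====
-- stated objective: faster
-- what changed: Replaces A's O(n^3) triple-nested pairwise scan (with a linear re-scan of the accumulated duplicate-index list) by a single pass over the zipped (name, price, weight) triples with a hash set of triples already seen.
import Mathlib
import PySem

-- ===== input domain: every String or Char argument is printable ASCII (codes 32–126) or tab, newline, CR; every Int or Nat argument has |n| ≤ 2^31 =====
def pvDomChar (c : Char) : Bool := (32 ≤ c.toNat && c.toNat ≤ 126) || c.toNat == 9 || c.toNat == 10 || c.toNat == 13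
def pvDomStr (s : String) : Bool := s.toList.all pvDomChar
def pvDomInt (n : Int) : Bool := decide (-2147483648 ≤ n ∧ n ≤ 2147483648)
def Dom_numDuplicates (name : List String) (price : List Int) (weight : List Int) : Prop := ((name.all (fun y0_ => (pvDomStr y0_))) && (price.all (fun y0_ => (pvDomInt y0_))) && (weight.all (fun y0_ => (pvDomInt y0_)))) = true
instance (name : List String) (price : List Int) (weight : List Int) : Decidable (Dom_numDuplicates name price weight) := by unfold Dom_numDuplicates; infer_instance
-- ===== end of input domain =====

-- B replaces A's O(n^3) triple-nested pairwise scan by one pass over the zipped triples with a set of seen triples (objective: faster).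
-- ===== PORT A =====
-- A's inner z-loop: scans dupes_which by index z, breaks at x, increments num at the last index.
def pvZScan (l : List Int) (x : Int) (len : Int) (z : Int) (num : Int) : Int :=
  match l with
  | [] => num
  | d :: rest =>
    if d = x then num
    else if z = len - 1 then pvZScan rest x len (z + 1) (num + 1)
    else pvZScan rest x len (z + 1) num

-- the guard of A's `if`; pyGetD is exact here: name indices come from range(len(name)),
-- and price/weight indices are in range wherever the guard's value matters, by Pre_numDuplicates
def pvGuard (name : List String) (price : List Int) (weight : List Int) (x y : Int) : Bool :=
  (PySem.List.pyGetD name x "" == PySem.List.pyGetD name y ""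
      && PySem.List.pyGetD price x 0 == PySem.List.pyGetD price y 0)
    && PySem.List.pyGetD weight x 0 == PySem.List.pyGetD weight y 0

-- body of A's y-loop; state = (num_dupes, dupes_which)
def pvInnerA (name : List String) (price : List Int) (weight : List Int) (x : Int)
    (st : Int × List Int) (y : Int) : Int × List Int :=
  if pvGuard name price weight x y then
    (pvZScan (st.2 ++ [y]) x (((st.2 ++ [y]).length : Nat) : Int) 0 st.1, st.2 ++ [y])
  else st

def numDuplicates (name : List String) (price : List Int) (weight : List Int) : Int :=
  ((PySem.List.pyRange 0 (name.length : Int) 1).foldl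
    (fun st x =>
      (PySem.List.pyRange (x + 1) (name.length : Int) 1).foldl
        (pvInnerA name price weight x) st)
    (0, [])).1

-- ===== PORT B =====
-- B's loop body: state = (seen, num_dupes)
def pvInnerB (st : PySem.Set (String × Int × Int) × Int) (t : String × Int × Int) :
    PySem.Set (String × Int × Int) × Int :=
  if PySem.Set.contains st.1 t then (st.1, st.2 + 1)
  else (PySem.Set.add st.1 t, st.2)

def numDuplicates_alt (name : List String) (price : List Int) (weight : List Int) : Int :=
  ((name.zip (price.zip weight)).foldl pvInnerB (PySem.Set.empty, 0)).2

-- ===== PRECONDITION & SPEC =====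
-- Pre_ excludes exactly the inputs where A raises IndexError: a name-equal pair (x<y) whose
-- price index y is out of range, or a name-and-price-equal pair whose weight index y is out of range.
def Pre_numDuplicates (name : List String) (price : List Int) (weight : List Int) : Prop :=
  ∀ y < name.length, ∀ x < y,
    name.getD x "" = name.getD y "" →
      y < price.length ∧ (price.getD x 0 = price.getD y 0 → y < weight.length)
instance (name : List String) (price : List Int) (weight : List Int) : Decidable (Pre_numDuplicates name price weight) := by unfold Pre_numDuplicates; infer_instance

def pvWitness_numDuplicates : List String × List Int × List Int := (["a", "a", "b"], [1, 1, 2], [5, 5, 6])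

def Spec_numDuplicates (name : List String) (price : List Int) (weight : List Int) (out : Int) : Prop := out = numDuplicates_alt name price weight
instance (name : List String) (price : List Int) (weight : List Int) (out : Int) : Decidable (Spec_numDuplicates name price weight out) := by unfold Spec_numDuplicates; infer_instance

-- ===== CLAIM (what is proved, stated in full; the proofs are below) =====
def Claim_equal_numDuplicates : Prop := ∀ (name : List String) (price : List Int) (weight : List Int), Dom_numDuplicates name price weight → Pre_numDuplicates name price weight → Spec_numDuplicates name price weight (numDuplicates name price weight)

-- ===== LEMMAS AND PROOFS =====

-- the triple (name[i], price[i], weight[i]) seen through defaults (indices in range wherever it matters)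
def pvTri (name : List String) (price : List Int) (weight : List Int) (i : ℕ) : String × Int × Int :=
  (name.getD i "", price.getD i 0, weight.getD i 0)

-- number of y < n having an equal triple at some i < min(x, y): A's num_dupes after outer rounds 0..x-1
def pvCount (name : List String) (price : List Int) (weight : List Int) (x n : ℕ) : ℕ :=
  (List.range n).countP (fun y => decide (∃ i, i < x ∧ i < y ∧ pvTri name price weight i = pvTri name price weight y))

-- A's dupes_which after outer rounds 0..k-1
def pvDW (name : List String) (price : List Int) (weight : List Int) (k : ℕ) (n : Int) : List Int :=
  (List.range k).foldl
    (fun acc (i : ℕ) => acc ++ (PySem.List.pyRange ((i : Int) + 1) n 1).filter (pvGuard name price weight (i : Int))) []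

lemma pvGuard_natCast (name : List String) (price : List Int) (weight : List Int) (i j : ℕ) :
    pvGuard name price weight i j = decide (pvTri name price weight i = pvTri name price weight j) := by
  simp [pvGuard, pvTri, PySem.List.pyGetD_natCast, Prod.ext_iff, Bool.and_assoc]
  simp only [beq_eq_decide]


lemma pvZScan_spec (x : Int) : ∀ (l : List Int) (len z num : Int), l ≠ [] → z + (l.length : Int) = len →
    pvZScan l x len z num = if x ∈ l then num else num + 1 := by
  intro l
  induction l with
  | nil => simp
  | cons d rest ih =>
    intro len z num _ hlen
    simp only [List.length_cons] at hlen
    by_cases hd : d = x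
    · simp [pvZScan, hd]
    · rcases rest with _ | ⟨e, rest'⟩
      · simp only [List.length_nil] at hlen
        simp [pvZScan, hd, show z = len - 1 by omega, Ne.symm hd]
      · have hne : z ≠ len - 1 := by
          have : (0 : Int) ≤ ((e :: rest').length : Int) := by positivity
          simp only [List.length_cons] at hlen ⊢
          push_cast at hlen
          omega
        have := ih len (z + 1) num (by simp) (by push_cast at hlen ⊢; omega)
        rw [pvZScan, if_neg hd, if_neg hne, this]
        simp [Ne.symm hd]

lemma pvMid_spec (name : List String) (price : List Int) (weight : List Int) (x a : Int) (hax : x < a) :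
    ∀ (k : ℕ) (num : Int) (dw : List Int),
      (PySem.List.pyRange a (a + k) 1).foldl (pvInnerA name price weight x) (num, dw) =
        (num + (if x ∈ dw then 0 else ((PySem.List.pyRange a (a + k) 1).countP (pvGuard name price weight x) : Int)),
         dw ++ (PySem.List.pyRange a (a + k) 1).filter (pvGuard name price weight x)) := by
  intro k
  induction k with
  | zero =>
    intro num dw
    simp [PySem.List.pyRange_one_eq_nil]
  | succ k ih =>
    intro num dw
    have hsplit : PySem.List.pyRange a (a + (k+1 : ℕ)) 1 = PySem.List.pyRange a (a + k) 1 ++ [a + k] := by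
      have := PySem.List.pyRange_one_succ_right (a := a) (b := a + k) (by omega)
      push_cast
      push_cast at this
      rw [show a + ((k : Int) + 1) = (a + k) + 1 by ring, this]
    rw [hsplit, List.foldl_append, ih num dw]
    have hxf : ∀ (l : List Int), x ∉ l.filter (pvGuard name price weight x) →
        True := fun _ _ => trivial
    have hmemf : x ∉ (PySem.List.pyRange a (a + k) 1).filter (pvGuard name price weight x) := by
      intro hx
      have := List.mem_filter.mp hx |>.1
      rw [PySem.List.mem_pyRange_one] at this
      omega
    simp only [List.foldl_cons, List.foldl_nil]
    rw [pvInnerA]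
    by_cases hg : pvGuard name price weight x (a + k) = true
    · rw [if_pos hg]
      have hdw' : dw ++ List.filter (pvGuard name price weight x) (PySem.List.pyRange a (a + (k:Int))) ++ [a + (k:Int)] ≠ [] := by simp
      rw [pvZScan_spec x _ _ 0 _ hdw' (by push_cast; ring)]
      have hxk : x ≠ a + k := by omega
      by_cases hdw : x ∈ dw
      · simp [hdw, hg, List.append_assoc, List.filter_append]
      · have hnotin : x ∉ dw ++ List.filter (pvGuard name price weight x) (PySem.List.pyRange a (a + (k:Int))) ++ [a + (k:Int)] := by
          simp only [List.mem_append, List.mem_singleton]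
          rintro ((h | h) | h)
          · exact hdw h
          · exact hmemf h
          · exact hxk h
        rw [if_neg hnotin]
        simp [hdw, hg, List.append_assoc, List.countP_append, List.filter_append]
        ring
    · rw [if_neg hg]
      simp [hg, List.countP_append, List.filter_append]

lemma pvDW_mem (name : List String) (price : List Int) (weight : List Int) (n : Int) :
    ∀ (k : ℕ) (j : Int), j ∈ pvDW name price weight k n ↔
      ∃ i < k, (i : Int) < j ∧ j < n ∧ pvGuard name price weight i j = true := by
  intro k
  induction k with
  | zero => simp [pvDW]
  | succ k ih =>
    intro j
    unfold pvDW
    rw [List.range_succ, List.foldl_append]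
    simp only [List.foldl_cons, List.foldl_nil]
    rw [List.mem_append]
    constructor
    · rintro (h | h)
      · obtain ⟨i, hi, h⟩ := (ih j).mp h
        exact ⟨i, by omega, h⟩
      · rw [List.mem_filter, PySem.List.mem_pyRange_one] at h
        exact ⟨k, by omega, by omega, h.1.2, h.2⟩
    · rintro ⟨i, hi, hij, hjn, hg⟩
      by_cases hik : i < k
      · exact Or.inl ((ih j).mpr ⟨i, hik, hij, hjn, hg⟩)
      · have : i = k := by omega
        subst this
        right
        rw [List.mem_filter, PySem.List.mem_pyRange_one]
        exact ⟨⟨by omega, hjn⟩, hg⟩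

lemma pvCount_range_shift (name : List String) (price : List Int) (weight : List Int) (k n : ℕ) (hk : k < n) :
    (List.range n).countP (fun y => decide (k < y ∧ pvTri name price weight k = pvTri name price weight y)) =
      (PySem.List.pyRange ((k : Int) + 1) n 1).countP (pvGuard name price weight k) := by
  have hsplit : List.range n = List.range (k + 1) ++ (List.range (n - (k + 1))).map (k + 1 + ·) := by
    rw [← List.range_add]
    congr 1
    omega
  rw [hsplit, List.countP_append]
  have h1 : (List.range (k + 1)).countP (fun y => decide (k < y ∧ pvTri name price weight k = pvTri name price weight y)) = 0 := by
    rw [List.countP_eq_zero]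
    intro y hy
    rw [List.mem_range] at hy
    simp
    omega
  rw [h1, Nat.zero_add, List.countP_map]
  rw [PySem.List.pyRange_one]
  rw [List.countP_map]
  have hlen : ((n : Int) - ((k : Int) + 1)).toNat = n - (k + 1) := by omega
  rw [hlen]
  apply List.countP_congr
  intro m _
  simp only [Function.comp]
  rw [show (k : Int) + 1 + (m : Int) = ((k + 1 + m : ℕ) : Int) by push_cast; ring, pvGuard_natCast]
  simp only [decide_eq_true_eq]
  constructor
  · rintro ⟨-, h⟩
    exact h
  · intro h
    exact ⟨by omega, h⟩

lemma pvCountP_split {α : Type} (p q r : α → Bool) :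
    ∀ (l : List α), (∀ a ∈ l, (p a = (q a || r a)) ∧ ¬(q a = true ∧ r a = true)) →
      l.countP p = l.countP q + l.countP r := by
  intro l
  induction l with
  | nil => simp
  | cons a t ih =>
    intro h
    obtain ⟨hpa, hqr⟩ := h a (by simp)
    rw [List.countP_cons, List.countP_cons, List.countP_cons, ih (fun b hb => h b (by simp [hb]))]
    rcases hq : q a <;> rcases hr : r a <;> simp [hpa, hq, hr] at hqr ⊢ <;> omega

lemma pvCount_succ (name : List String) (price : List Int) (weight : List Int) (k n : ℕ) (hk : k < n) :
    pvCount name price weight (k + 1) n =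
      pvCount name price weight k n +
        (if ∃ i < k, pvTri name price weight i = pvTri name price weight k then 0
         else (PySem.List.pyRange ((k : Int) + 1) n 1).countP (pvGuard name price weight k)) := by
  by_cases hdup : ∃ i < k, pvTri name price weight i = pvTri name price weight k
  · rw [if_pos hdup, Nat.add_zero]
    unfold pvCount
    apply List.countP_congr
    intro y _
    simp only [decide_eq_true_eq]
    constructor
    · rintro ⟨i, hik, hiy, he⟩
      by_cases hik' : i < k
      · exact ⟨i, hik', hiy, he⟩
      · have : i = k := by omega
        subst this
        obtain ⟨i', hi', he'⟩ := hdup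
        exact ⟨i', by omega, by omega, he'.trans he⟩
    · rintro ⟨i, hik, hiy, he⟩
      exact ⟨i, by omega, hiy, he⟩
  · rw [if_neg hdup, ← pvCount_range_shift name price weight k n hk]
    unfold pvCount
    apply pvCountP_split
    intro y _
    constructor
    · rw [Bool.eq_iff_iff]
      simp only [decide_eq_true_eq, Bool.or_eq_true]
      constructor
      · rintro ⟨i, hik, hiy, he⟩
        by_cases hik' : i < k
        · exact Or.inl ⟨i, hik', hiy, he⟩
        · have : i = k := by omega
          subst this
          exact Or.inr ⟨hiy, he⟩
      · rintro (⟨i, hik, hiy, he⟩ | ⟨hky, he⟩)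
        · exact ⟨i, by omega, hiy, he⟩
        · exact ⟨k, by omega, hky, he⟩
    · rintro ⟨h1, h2⟩
      simp only [decide_eq_true_eq] at h1 h2
      obtain ⟨i, hik, hiy, he⟩ := h1
      exact hdup ⟨i, hik, he.trans h2.2.symm⟩

lemma pvOuter_spec (name : List String) (price : List Int) (weight : List Int) :
    ∀ (k : ℕ), k ≤ name.length →
      (PySem.List.pyRange 0 (k : Int) 1).foldl
        (fun st x => (PySem.List.pyRange (x + 1) (name.length : Int) 1).foldl (pvInnerA name price weight x) st)
        (0, []) =
      ((pvCount name price weight k name.length : Int), pvDW name price weight k (name.length : Int)) := by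
  intro k
  induction k with
  | zero =>
    intro _
    simp [pvCount, pvDW]
  | succ k ih =>
    intro hk
    have hkn : k < name.length := by omega
    have hsplit : PySem.List.pyRange 0 ((k + 1 : ℕ) : Int) 1 = PySem.List.pyRange 0 (k : Int) 1 ++ [(k : Int)] := by
      have := PySem.List.pyRange_one_succ_right (a := 0) (b := (k : Int)) (by positivity)
      push_cast [this]
      rfl
    rw [hsplit, List.foldl_append, ih (by omega)]
    simp only [List.foldl_cons, List.foldl_nil]
    have hmid := pvMid_spec name price weight (k : Int) ((k : Int) + 1) (by omega)
      (name.length - (k + 1)) (pvCount name price weight k name.length) (pvDW name price weight k (name.length : Int))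
    rw [show ((k : Int) + 1) + ((name.length - (k + 1) : ℕ) : Int) = (name.length : Int) by omega] at hmid
    rw [hmid]
    have hmem : ((k : Int) ∈ pvDW name price weight k (name.length : Int)) ↔
        ∃ i < k, pvTri name price weight i = pvTri name price weight k := by
      rw [pvDW_mem]
      constructor
      · rintro ⟨i, hik, -, -, hg⟩
        rw [pvGuard_natCast] at hg
        exact ⟨i, hik, by simpa using hg⟩
      · rintro ⟨i, hik, he⟩
        exact ⟨i, hik, by omega, by omega, by rw [pvGuard_natCast]; simpa using he⟩
    rw [Prod.mk.injEq]
    refine ⟨?_, ?_⟩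
    · rw [pvCount_succ name price weight k name.length hkn]
      by_cases hd : ∃ i < k, pvTri name price weight i = pvTri name price weight k
      · rw [if_pos (hmem.mpr hd), if_pos hd]
        push_cast
        ring
      · rw [if_neg (fun h => hd (hmem.mp h)), if_neg hd]
        push_cast
        ring
    · show _ = pvDW name price weight (k + 1) (name.length : Int)
      unfold pvDW
      rw [List.range_succ, List.foldl_append]
      simp only [List.foldl_cons, List.foldl_nil]

lemma pvA_eq (name : List String) (price : List Int) (weight : List Int) :
    numDuplicates name price weight =
      ((List.range name.length).countP
        (fun y => decide (∃ i < y, pvTri name price weight i = pvTri name price weight y)) : ℕ) := by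
  unfold numDuplicates
  rw [pvOuter_spec name price weight name.length (le_refl _)]
  norm_num [pvCount]
  apply List.countP_congr
  intro y hy
  rw [List.mem_range] at hy
  simp only [decide_eq_true_eq]
  constructor
  · rintro ⟨i, -, hiy, he⟩
    exact ⟨i, hiy, he⟩
  · rintro ⟨i, hiy, he⟩
    exact ⟨i, by omega, hiy, he⟩

lemma pvB_fold (d : String × Int × Int) :
    ∀ (l p : List (String × Int × Int)) (c : Int),
      (l.foldl pvInnerB (PySem.Set.ofList p, c)).2 =
        c + (((List.range l.length).countP
          (fun j => decide (l.getD j d ∈ p ++ l.take j))) : ℕ) := by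
  intro l
  induction l with
  | nil => simp
  | cons a rest ih =>
    intro p c
    rw [List.foldl_cons]
    have hcnt : (List.range (a :: rest).length).countP
          (fun j => decide ((a :: rest).getD j d ∈ p ++ (a :: rest).take j)) =
        ((if a ∈ p then 1 else 0) : ℕ) +
          (List.range rest.length).countP (fun j => decide (rest.getD j d ∈ (p ++ [a]) ++ rest.take j)) := by
      rw [List.length_cons, List.range_succ_eq_map, List.countP_cons, List.countP_map, Nat.add_comm]
      congr 1
      · by_cases hap : a ∈ p <;> simp [hap]
      · apply List.countP_congr
        intro j _
        simp only [Function.comp, decide_eq_true_eq, List.getD_cons_succ, List.take_succ_cons,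
          List.append_assoc, List.cons_append, List.nil_append]
    by_cases hmem : a ∈ p
    · have hc : PySem.Set.contains (PySem.Set.ofList p) a = true := by
        rw [PySem.Set.contains_iff, PySem.Set.mem_ofList]; exact hmem
      rw [show pvInnerB (PySem.Set.ofList p, c) a = (PySem.Set.ofList p, c + 1) by
        simp [pvInnerB, hmem]]
      rw [ih p (c + 1), hcnt]
      have : (List.range rest.length).countP (fun j => decide (rest.getD j d ∈ (p ++ [a]) ++ rest.take j)) =
          (List.range rest.length).countP (fun j => decide (rest.getD j d ∈ p ++ rest.take j)) := by
        apply List.countP_congr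
        intro j _
        simp only [decide_eq_true_eq, List.append_assoc, List.mem_append, List.mem_singleton]
        constructor
        · rintro (h | h | h)
          · exact Or.inl h
          · exact Or.inl (h ▸ hmem)
          · exact Or.inr h
        · tauto
      rw [this, if_pos hmem]
      push_cast
      ring
    · have hc : PySem.Set.contains (PySem.Set.ofList p) a = false := by
        rw [Bool.eq_false_iff]
        intro h
        rw [PySem.Set.contains_iff] at h
        simp [PySem.Set.mem_ofList] at h
        exact hmem h
      rw [show pvInnerB (PySem.Set.ofList p, c) a = (PySem.Set.ofList (p ++ [a]), c) by
        simp [pvInnerB, hmem, PySem.Set.ofList_append_singleton]]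
      rw [ih (p ++ [a]) c, hcnt, if_neg hmem]
      push_cast
      ring


lemma pvZip_getD (name : List String) (price : List Int) (weight : List Int) (i : ℕ)
    (hi : i < (name.zip (price.zip weight)).length) :
    (name.zip (price.zip weight)).getD i ("", 0, 0) = pvTri name price weight i := by
  rw [List.length_zip, List.length_zip] at hi
  have h1 : i < name.length := by omega
  have h2 : i < price.length := by omega
  have h3 : i < weight.length := by omega
  rw [List.getD_eq_getElem?_getD, List.getElem?_eq_getElem (by simp [List.length_zip]; omega)]
  simp [List.getElem_zip, pvTri, List.getD_eq_getElem?_getD, h1, h2, h3]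

lemma pvB_eq (name : List String) (price : List Int) (weight : List Int) :
    numDuplicates_alt name price weight =
      ((List.range (name.zip (price.zip weight)).length).countP
        (fun y => decide (∃ i < y, pvTri name price weight i = pvTri name price weight y)) : ℕ) := by
  unfold numDuplicates_alt
  have he : (PySem.Set.empty : PySem.Set (String × Int × Int)) = PySem.Set.ofList [] := rfl
  rw [he, pvB_fold ("", 0, 0) (name.zip (price.zip weight)) [] 0, Int.zero_add]
  congr 1
  apply List.countP_congr
  intro y hy
  rw [List.mem_range] at hy
  simp only [List.nil_append, decide_eq_true_eq]
  rw [List.mem_take_iff_getElem]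
  constructor
  · rintro ⟨i, hi, he2⟩
    have hi' : i < (name.zip (price.zip weight)).length := by omega
    refine ⟨i, by omega, ?_⟩
    rw [← pvZip_getD name price weight i hi', ← pvZip_getD name price weight y hy]
    rw [List.getD_eq_getElem?_getD, List.getElem?_eq_getElem hi',
        List.getD_eq_getElem?_getD]
    simp only [Option.getD_some, he2]
    rw [List.getD_eq_getElem?_getD]
  · rintro ⟨i, hiy, he2⟩
    have hi' : i < (name.zip (price.zip weight)).length := by omega
    refine ⟨i, by omega, ?_⟩
    rw [show (name.zip (price.zip weight))[i]'(by omega) =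
        (name.zip (price.zip weight)).getD i ("", 0, 0) by
      rw [List.getD_eq_getElem?_getD, List.getElem?_eq_getElem hi', Option.getD_some]]
    rw [pvZip_getD name price weight i hi', pvZip_getD name price weight y hy, he2]


lemma pvEq_pre (name : List String) (price : List Int) (weight : List Int)
    (hpre : Pre_numDuplicates name price weight) :
    (List.range name.length).countP
        (fun y => decide (∃ i < y, pvTri name price weight i = pvTri name price weight y)) =
      (List.range (name.zip (price.zip weight)).length).countP
        (fun y => decide (∃ i < y, pvTri name price weight i = pvTri name price weight y)) := by
  set m := (name.zip (price.zip weight)).length with hm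
  have hmlen : m = min name.length (min price.length weight.length) := by
    simp [hm, List.length_zip]
  have hmn : m ≤ name.length := by omega
  have hsplit : List.range name.length = List.range m ++ (List.range (name.length - m)).map (m + ·) := by
    rw [← List.range_add]
    congr 1
    omega
  rw [hsplit, List.countP_append]
  have h0 : ((List.range (name.length - m)).map (m + ·)).countP
      (fun y => decide (∃ i < y, pvTri name price weight i = pvTri name price weight y)) = 0 := by
    rw [List.countP_eq_zero]
    intro y hy
    rw [List.mem_map] at hy
    obtain ⟨j, hj, rfl⟩ := hy
    rw [List.mem_range] at hj
    simp only [decide_eq_true_eq, not_exists, not_and]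
    intro i hi he
    have hyn : m + j < name.length := by omega
    have hname : name.getD i "" = name.getD (m + j) "" := congrArg Prod.fst he
    have hrest := hpre (m + j) hyn i hi hname
    have hprice : price.getD i 0 = price.getD (m + j) 0 := congrArg (Prod.fst ∘ Prod.snd) he
    have hw := hrest.2 hprice
    omega
  rw [h0]
  omega

-- ===== VERDICT (by name: the statement is the Claim_ definition above) =====
theorem numDuplicates_spec : Claim_equal_numDuplicates := by
  intro name price weight _ hpre
  unfold Spec_numDuplicates
  rw [pvA_eq, pvB_eq, pvEq_pre name price weight hpre]
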